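-- pv_equiv track=rewrite | github.com/velascoandres/Trabajando | desplazamiento.py | generar_ruta_constante
-- ===== SOURCE A (Python) =====
-- def generar_ruta_constante(const_x, const_y, total, tipo='H'):
--     ruta = []
--     acumulador_y = 0
--     acumulador_x = 0
--     for contador in range(0, total):
--         if tipo == 'V':
--             acumulador_x = const_x
--             acumulador_y = acumulador_y + const_y
--         if tipo == 'H':
--             acumulador_y = const_y
--             acumulador_x = acumulador_x + const_x
--         if tipo == 'D':
--             acumulador_x = acumulador_x + const_x
--             acumulador_y = acumulador_y + const_y
--
--         ruta.append([acumulador_x, acumulador_y])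
--     return ruta
-- ===== SOURCE B (Python) =====
-- def generar_ruta_constante(const_x, const_y, total, tipo='H'):
--     n = max(total, 0)
--     if tipo == 'V':
--         xs = [const_x] * n
--         ys = [(i + 1) * const_y for i in range(n)]
--     elif tipo == 'H':
--         xs = [(i + 1) * const_x for i in range(n)]
--         ys = [const_y] * n
--     elif tipo == 'D':
--         xs = [(i + 1) * const_x for i in range(n)]
--         ys = [(i + 1) * const_y for i in range(n)]
--     else:
--         xs = [0] * n
--         ys = [0] * n
--     return [[x, y] for x, y in zip(xs, ys)]
-- ===== Notes on version B (the rewrite author's own statement) =====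
-- stated objective: alternative
-- what changed: Replaces the sequential loop with two running accumulators by a per-axis closed form: each coordinate column is either a constant column or (i+1)*const computed directly by index, then zipped into the route.
import Mathlib
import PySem

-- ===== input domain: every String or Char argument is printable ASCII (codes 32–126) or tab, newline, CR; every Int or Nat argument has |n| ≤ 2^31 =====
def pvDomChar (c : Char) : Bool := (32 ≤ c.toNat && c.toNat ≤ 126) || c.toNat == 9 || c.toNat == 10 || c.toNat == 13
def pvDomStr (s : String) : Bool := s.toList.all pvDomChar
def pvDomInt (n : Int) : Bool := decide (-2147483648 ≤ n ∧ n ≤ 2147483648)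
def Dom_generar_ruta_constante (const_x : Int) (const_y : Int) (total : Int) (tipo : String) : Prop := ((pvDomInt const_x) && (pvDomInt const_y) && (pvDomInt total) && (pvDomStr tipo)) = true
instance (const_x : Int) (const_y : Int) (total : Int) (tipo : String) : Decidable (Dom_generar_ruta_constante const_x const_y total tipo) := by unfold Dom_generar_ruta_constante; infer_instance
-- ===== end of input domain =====

-- B replaces A's single loop carrying two running accumulators by per-axis closed-form
-- columns ((i+1)*const or a constant column) zipped into the route; objective: alternative.

-- ===== PORT A =====
-- loop body of A: the three sequential 'if tipo == …' updates, then the append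
def pvStepA (const_x : Int) (const_y : Int) (tipo : String)
    (st : List (List Int) × Int × Int) : List (List Int) × Int × Int :=
  let ax := st.2.1
  let ay := st.2.2
  let p1 : Int × Int := if tipo = "V" then (const_x, ay + const_y) else (ax, ay)
  let p2 : Int × Int := if tipo = "H" then (p1.1 + const_x, const_y) else p1
  let p3 : Int × Int := if tipo = "D" then (p2.1 + const_x, p2.2 + const_y) else p2
  (st.1 ++ [[p3.1, p3.2]], p3.1, p3.2)

def generar_ruta_constante (const_x : Int) (const_y : Int) (total : Int) (tipo : String) : List (List Int) :=
  ((PySem.List.pyRange 0 total 1).foldl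
    (fun st _ => pvStepA const_x const_y tipo st) ([], 0, 0)).1

-- ===== PORT B =====
def generar_ruta_constante_alt (const_x : Int) (const_y : Int) (total : Int) (tipo : String) : List (List Int) :=
  let n := (max total 0).toNat
  let cols : List Int × List Int :=
    if tipo = "V" then
      (List.replicate n const_x, (List.range n).map (fun (i : Nat) => ((i : Int) + 1) * const_y))
    else if tipo = "H" then
      ((List.range n).map (fun (i : Nat) => ((i : Int) + 1) * const_x), List.replicate n const_y)
    else if tipo = "D" then
      ((List.range n).map (fun (i : Nat) => ((i : Int) + 1) * const_x),
       (List.range n).map (fun (i : Nat) => ((i : Int) + 1) * const_y))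
    else
      (List.replicate n 0, List.replicate n 0)
  List.zipWith (fun x y => [x, y]) cols.1 cols.2

-- ===== PRECONDITION & SPEC =====
def Spec_generar_ruta_constante (const_x : Int) (const_y : Int) (total : Int) (tipo : String) (out : List (List Int)) : Prop := out = generar_ruta_constante_alt const_x const_y total tipo
instance (const_x : Int) (const_y : Int) (total : Int) (tipo : String) (out : List (List Int)) : Decidable (Spec_generar_ruta_constante const_x const_y total tipo out) := by unfold Spec_generar_ruta_constante; infer_instance

-- ===== CLAIM (what is proved, stated in full; the proofs are below) =====
def Claim_equal_generar_ruta_constante : Prop := ∀ (const_x : Int) (const_y : Int) (total : Int) (tipo : String), Dom_generar_ruta_constante const_x const_y total tipo → Spec_generar_ruta_constante const_x const_y total tipo (generar_ruta_constante const_x const_y total tipo)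

-- ===== LEMMAS AND PROOFS =====

-- a fold that ignores the elements only depends on the list's length
theorem pv_foldl_const {α β : Type} (g : α → α) (l : List β) (s : α) :
    l.foldl (fun s _ => g s) s = g^[l.length] s := by
  induction l generalizing s with
  | nil => rfl
  | cons a t ih => simp [List.foldl_cons, ih, Function.iterate_succ_apply]

theorem pv_zip_map_rep {α β γ δ : Type} (g : β → γ → δ) (f : α → β) (c : γ) (l : List α) :
    List.zipWith g (l.map f) (List.replicate l.length c) = l.map (fun a => g (f a) c) := by
  induction l with
  | nil => rfl
  | cons a t ih => simp [List.replicate_succ, ih]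

theorem pv_zip_rep_map {α β γ δ : Type} (g : γ → β → δ) (f : α → β) (c : γ) (l : List α) :
    List.zipWith g (List.replicate l.length c) (l.map f) = l.map (fun a => g c (f a)) := by
  induction l with
  | nil => rfl
  | cons a t ih => simp [List.replicate_succ, ih]

theorem pv_zip_map_map {α β γ δ : Type} (g : β → γ → δ) (f : α → β) (f' : α → γ) (l : List α) :
    List.zipWith g (l.map f) (l.map f') = l.map (fun a => g (f a) (f' a)) := by
  induction l with
  | nil => rfl
  | cons a t ih => simp [ih]

theorem pv_zip_rep_rep {β γ δ : Type} (g : β → γ → δ) (c : β) (c' : γ) (n : Nat) :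
    List.zipWith g (List.replicate n c) (List.replicate n c') = List.replicate n (g c c') := by
  induction n with
  | zero => rfl
  | succ n ih => simp [List.replicate_succ, ih]

theorem pv_iter_V (cx cy : Int) (n : Nat) :
    (fun st => pvStepA cx cy "V" st)^[n] (([], 0, 0) : List (List Int) × Int × Int) =
      ((List.range n).map (fun (i : Nat) => [cx, ((i : Int) + 1) * cy]),
       if n = 0 then 0 else cx, n * cy) := by
  induction n with
  | zero => simp
  | succ n ih =>
    rw [Function.iterate_succ_apply', ih]
    simp only [pvStepA, String.reduceEq, reduceIte]
    simp [List.range_succ]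
    ring

theorem pv_iter_H (cx cy : Int) (n : Nat) :
    (fun st => pvStepA cx cy "H" st)^[n] (([], 0, 0) : List (List Int) × Int × Int) =
      ((List.range n).map (fun (i : Nat) => [((i : Int) + 1) * cx, cy]),
       n * cx, if n = 0 then 0 else cy) := by
  induction n with
  | zero => simp
  | succ n ih =>
    rw [Function.iterate_succ_apply', ih]
    simp only [pvStepA, String.reduceEq, reduceIte]
    simp [List.range_succ]
    ring

theorem pv_iter_D (cx cy : Int) (n : Nat) :
    (fun st => pvStepA cx cy "D" st)^[n] (([], 0, 0) : List (List Int) × Int × Int) =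
      ((List.range n).map (fun (i : Nat) => [((i : Int) + 1) * cx, ((i : Int) + 1) * cy]),
       n * cx, n * cy) := by
  induction n with
  | zero => simp
  | succ n ih =>
    rw [Function.iterate_succ_apply', ih]
    simp only [pvStepA, String.reduceEq, reduceIte]
    simp [List.range_succ]
    constructor <;> ring

theorem pv_iter_other (cx cy : Int) (tipo : String)
    (h1 : tipo ≠ "V") (h2 : tipo ≠ "H") (h3 : tipo ≠ "D") (n : Nat) :
    (fun st => pvStepA cx cy tipo st)^[n] (([], 0, 0) : List (List Int) × Int × Int) =
      (List.replicate n [0, 0], 0, 0) := by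
  induction n with
  | zero => simp
  | succ n ih =>
    rw [Function.iterate_succ_apply', ih]
    simp [pvStepA, h1, h2, h3, List.replicate_succ']

-- ===== VERDICT (by name: the statement is the Claim_ definition above) =====
theorem generar_ruta_constante_spec : Claim_equal_generar_ruta_constante := by
  intro cx cy total tipo _
  unfold Spec_generar_ruta_constante generar_ruta_constante generar_ruta_constante_alt
  rw [pv_foldl_const]
  have hn : (PySem.List.pyRange 0 total 1).length = (max total 0).toNat := by
    rw [PySem.List.length_pyRange_one]; omega
  rw [hn]
  set n := (max total 0).toNat with hdef
  by_cases h1 : tipo = "V"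
  · subst h1
    rw [pv_iter_V]
    simp only [String.reduceEq, reduceIte]
    have h := pv_zip_rep_map (fun x y => ([x, y] : List Int))
      (fun (i : Nat) => ((i : Int) + 1) * cy) cx (List.range n)
    simp only [List.length_range] at h
    rw [h]
  · by_cases h2 : tipo = "H"
    · subst h2
      rw [pv_iter_H]
      simp only [String.reduceEq, reduceIte]
      have h := pv_zip_map_rep (fun x y => ([x, y] : List Int))
        (fun (i : Nat) => ((i : Int) + 1) * cx) cy (List.range n)
      simp only [List.length_range] at h
      rw [h]
    · by_cases h3 : tipo = "D"
      · subst h3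
        rw [pv_iter_D]
        simp only [String.reduceEq, reduceIte]
        rw [pv_zip_map_map]
      · rw [pv_iter_other cx cy tipo h1 h2 h3]
        simp only [if_neg h1, if_neg h2, if_neg h3]
        rw [pv_zip_rep_rep]
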